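-- pv_equiv track=rewrite | github.com/glem-fumeno/aquaq | challanges/o_rle.py | solve
-- ===== SOURCE A (Python) =====
-- def solve(input_file: str):
--     counts = 0
--     for line in input_file.splitlines():
--         snippet_count = 0
--         for i in range(len(line) - 1):
--             for j in range(i + 1, len(line) - 1):
--                 if (len(line) - i - 1) // (j - i) < snippet_count:
--                     continue
--                 repeats = line[i:]
--                 count = 0
--                 while repeats.startswith(line[i:j]):
--                     count += 1
--                     repeats = repeats.removeprefix(line[i:j])
--                 if count > snippet_count:
--                     snippet_count = count
--         counts += snippet_count
--     return counts
-- ===== SOURCE B (Python) =====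
-- def solve(input_file: str):
--     # Period-major dynamic programming: for each period p (ascending), one backward
--     # pass maintains run = LCP(line[i:], line[i+p:]); the repeat count at start i for
--     # period p is run // p + 1.  Since any count for period p is at most n // p, the
--     # period loop stops as soon as n // p < best.
--     total = 0
--     for line in input_file.splitlines():
--         n = len(line)
--         best = 0
--         for p in range(1, n - 1):
--             if n // p < best:
--                 break
--             run = 0
--             for i in range(n - 1 - p, -1, -1):
--                 if line[i] == line[i + p]:
--                     run += 1
--                 else:
--                     run = 0
--                 if i + p <= n - 2:
--                     best = max(best, run // p + 1)
--         total += best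
--     return total
-- ===== Notes on version B (the rewrite author's own statement) =====
-- stated objective: faster
-- what changed: A measures each candidate snippet line[i:j] by repeatedly calling startswith and stripping the prefix off the suffix; B instead iterates periods p in ascending order and, per period, runs one backward pass that maintains run = LCP(line[i:], line[i+p:]) so the repeat count at (i, p) is run // p + 1, with an exact early break once n // p < best.
import Mathlib
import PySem

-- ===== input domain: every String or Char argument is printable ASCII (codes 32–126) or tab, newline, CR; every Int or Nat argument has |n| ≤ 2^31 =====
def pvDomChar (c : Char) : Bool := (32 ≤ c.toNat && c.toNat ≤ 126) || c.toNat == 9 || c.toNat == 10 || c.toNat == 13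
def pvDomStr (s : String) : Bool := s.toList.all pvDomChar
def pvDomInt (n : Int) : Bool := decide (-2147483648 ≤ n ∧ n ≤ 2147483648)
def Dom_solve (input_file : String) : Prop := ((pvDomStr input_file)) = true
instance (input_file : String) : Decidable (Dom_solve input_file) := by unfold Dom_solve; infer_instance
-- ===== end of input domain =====

-- B replaces A's per-(start,snippet-end) repeated startswith/removeprefix stripping by a
-- period-major backward LCP dynamic programme with an exact early break; measured faster.

-- ===== PORT A =====
-- the `while repeats.startswith(line[i:j]): count += 1; repeats = repeats.removeprefix(line[i:j])`
-- loop; the `t ≠ []` conjunct is a termination guard only (in A the snippet line[i:j] with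
-- i < j ≤ len-1 is never empty, and then Python's startswith/removeprefix are exactly this).
def countA (t rep : List Char) : Nat :=
  if h : t ≠ [] ∧ t.isPrefixOf rep then countA t (rep.drop t.length) + 1 else 0
termination_by rep.length
decreasing_by
  rcases h with ⟨hne, hpre⟩
  have hle : t.length ≤ rep.length :=
    (List.isPrefixOf_iff_prefix.mp hpre).length_le
  have hpos : 0 < t.length := List.length_pos_iff.mpr hne
  simp only [List.length_drop]; omega

-- literal port of A; all slice indices are nonnegative and in range (0 ≤ i < j ≤ len), where
-- line[i:j] = (toList.drop i).take (j-i) and line[i:] = toList.drop i are exact; `//` on the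
-- nonnegative quantities is Nat division.
def solve (input_file : String) : Int :=
  (PySem.Str.splitlines input_file).foldl (fun counts line =>
    let l := line.toList
    let n := l.length
    let sc := (List.range (n - 1)).foldl (fun sc i =>
      (List.range' (i + 1) ((n - 1) - (i + 1))).foldl (fun sc j =>
        if (n - i - 1) / (j - i) < sc then sc
        else
          let c := countA ((l.drop i).take (j - i)) (l.drop i)
          if c > sc then c else sc) sc) 0
    counts + (sc : Int)) 0

-- ===== PORT B =====
-- the backward `for i in range(n - 1 - p, -1, -1)` loop of Source B: k iterations remain, the
-- current index is i = k - 1; line[i] == line[i + p] is compared through `getElem?` (both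
-- indices are < n on every reachable iteration, exactly as in the Python).
def goB (l : List Char) (n p : Nat) : Nat → Nat → Nat → Nat
  | 0, _run, best => best
  | k + 1, run, best =>
    let run' := if l[k]? = l[k + p]? then run + 1 else 0
    let best' := if k + p ≤ n - 2 then max best (run' / p + 1) else best
    goB l n p k run' best'

-- the `for p in range(1, n - 1)` loop with its `if n // p < best: break`
def periodLoop (l : List Char) (n : Nat) : List Nat → Nat → Nat
  | [], best => best
  | p :: ps, best =>
    if n / p < best then best
    else periodLoop l n ps (goB l n p (n - p) 0 best)

def solve_alt (input_file : String) : Int :=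
  (PySem.Str.splitlines input_file).foldl (fun total line =>
    let l := line.toList
    let n := l.length
    let best := periodLoop l n (List.range' 1 ((n - 1) - 1)) 0
    total + (best : Int)) 0

-- ===== PRECONDITION & SPEC =====
def Spec_solve (input_file : String) (out : Int) : Prop := out = solve_alt input_file
instance (input_file : String) (out : Int) : Decidable (Spec_solve input_file out) := by unfold Spec_solve; infer_instance

-- ===== CLAIM (what is proved, stated in full; the proofs are below) =====
def Claim_equal_solve : Prop := ∀ (input_file : String), Dom_solve input_file → Spec_solve input_file (solve input_file)

-- ===== LEMMAS AND PROOFS =====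

-- longest common prefix of two suffixes (proof-side characterisation of B's `run`)
def lcpB : List Char → List Char → Nat
  | x :: xs, y :: ys => if x = y then lcpB xs ys + 1 else 0
  | _, _ => 0

def supL (xs : List Nat) : Nat := xs.foldr max 0

lemma le_supL {x : Nat} {xs : List Nat} (h : x ∈ xs) : x ≤ supL xs := by
  induction xs with
  | nil => cases h
  | cons y ys ih =>
    rcases List.mem_cons.mp h with rfl | h
    · simp [supL]
    · have := ih h; simp only [supL, List.foldr_cons] at *; omega

lemma supL_le {xs : List Nat} {m : Nat} (h : ∀ x ∈ xs, x ≤ m) : supL xs ≤ m := by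
  induction xs with
  | nil => simp [supL]
  | cons y ys ih =>
    have h1 := h y (by simp)
    have h2 := ih (fun x hx => h x (by simp [hx]))
    simp only [supL, List.foldr_cons] at *; omega

lemma foldl_max_eq {α : Type} (f : α → Nat) :
    ∀ (xs : List α) (a : Nat), xs.foldl (fun s x => max s (f x)) a = max a (supL (xs.map f)) := by
  intro xs
  induction xs with
  | nil => intro a; simp [supL]
  | cons x xs ih =>
    intro a
    simp only [List.foldl_cons, List.map_cons, supL, List.foldr_cons, ih]
    simp only [supL] at *; omega

lemma supL_range_succ (v : Nat → Nat) (k : Nat) :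
    supL ((List.range (k + 1)).map v) = max (supL ((List.range k).map v)) (v k) := by
  rw [List.range_succ, List.map_append]
  induction ((List.range k).map v) with
  | nil => simp [supL]
  | cons y ys ih => simp only [supL, List.cons_append, List.foldr_cons] at *; omega

lemma lcpB_le_right : ∀ xs ys : List Char, lcpB xs ys ≤ ys.length := by
  intro xs
  induction xs with
  | nil => intro ys; simp [lcpB]
  | cons x xs ih =>
    intro ys
    cases ys with
    | nil => simp [lcpB]
    | cons y ys =>
      simp only [lcpB, List.length_cons]
      split
      · have := ih ys; omega
      · omega

lemma lcpB_take : ∀ xs ys : List Char, xs.take (lcpB xs ys) = ys.take (lcpB xs ys) := by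
  intro xs
  induction xs with
  | nil => intro ys; cases ys <;> simp [lcpB]
  | cons x xs ih =>
    intro ys
    cases ys with
    | nil => simp [lcpB]
    | cons y ys =>
      simp only [lcpB]
      split
      · next h => simp [List.take_succ_cons, h, ih ys]
      · simp

lemma lcpB_ge_of_take_eq : ∀ (p : Nat) (xs ys : List Char), p ≤ xs.length →
    xs.take p = ys.take p → p ≤ lcpB xs ys := by
  intro p
  induction p with
  | zero => intro xs ys _ _; omega
  | succ p ih =>
    intro xs ys hlen htake
    cases xs with
    | nil => simp at hlen
    | cons x xs =>
      cases ys with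
      | nil => simp [List.take_succ_cons] at htake
      | cons y ys =>
        simp only [List.take_succ_cons, List.cons.injEq] at htake
        obtain ⟨rfl, hteq⟩ := htake
        have := ih xs ys (by simpa using hlen) hteq
        simp only [lcpB]
        simp
        omega

lemma lcpB_drop : ∀ (p : Nat) (xs ys : List Char), p ≤ lcpB xs ys →
    lcpB (xs.drop p) (ys.drop p) = lcpB xs ys - p := by
  intro p
  induction p with
  | zero => intro xs ys _; simp
  | succ p ih =>
    intro xs ys hp
    cases xs with
    | nil => simp [lcpB] at hp
    | cons x xs =>
      cases ys with
      | nil => simp [lcpB] at hp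
      | cons y ys =>
        by_cases hxy : x = y
        · simp only [lcpB, if_pos hxy] at hp ⊢
          simp only [List.drop_succ_cons]
          rw [ih xs ys (by omega)]
          omega
        · simp [lcpB, hxy] at hp

-- A's stripping loop counts exactly lcpB s (s.drop p) / p + 1 repetitions of s.take p in s
lemma countA_eq : ∀ (m : Nat) (s : List Char) (p : Nat), s.length ≤ m → 1 ≤ p → p ≤ s.length →
    countA (s.take p) s = lcpB s (s.drop p) / p + 1 := by
  intro m
  induction m with
  | zero => intro s p hm hp hps; omega
  | succ m ih =>
    intro s p hm hp hps
    have htlen : (s.take p).length = p := by simp; omega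
    have htne : s.take p ≠ [] := by
      intro h; rw [h] at htlen; simp at htlen; omega
    have hpre : (s.take p).isPrefixOf s :=
      List.isPrefixOf_iff_prefix.mpr (List.take_prefix p s)
    rw [countA, dif_pos ⟨htne, hpre⟩, htlen]
    set L := lcpB s (s.drop p) with hL
    rcases Nat.lt_or_ge L p with hLp | hLp
    · -- the snippet does not tile a second time
      have hnot : ¬ (s.take p).isPrefixOf (s.drop p) := by
        intro hpr
        have : s.take p = (s.drop p).take p := by
          have := List.prefix_iff_eq_take.mp (List.isPrefixOf_iff_prefix.mp hpr)
          rwa [htlen] at this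
        exact absurd (lcpB_ge_of_take_eq p s (s.drop p) hps this) (by omega)
      rw [countA, dif_neg (by tauto)]
      rw [Nat.div_eq_of_lt hLp]
    · have hdlen : (s.drop p).length = s.length - p := by simp
      have hLle : L ≤ s.length - p := by
        have := lcpB_le_right s (s.drop p); rw [hdlen] at this; omega
      have hpd : p ≤ (s.drop p).length := by omega
      have htake_eq : s.take p = (s.drop p).take p := by
        have h1 := lcpB_take s (s.drop p)
        have h2 := congrArg (List.take p) h1
        rw [List.take_take, List.take_take, Nat.min_eq_left hLp] at h2
        exact h2
      rw [htake_eq]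
      rw [ih (s.drop p) p (by rw [hdlen]; omega) hp hpd]
      rw [lcpB_drop p s (s.drop p) hLp, ← hL]
      have hsplit : L - p + p = L := by omega
      have : (L - p + p) / p = (L - p) / p + 1 := Nat.add_div_right _ (by omega)
      rw [hsplit] at this
      omega

-- the per-(start, period) candidate value
def vC (l : List Char) (i p : Nat) : Nat := lcpB (l.drop i) (l.drop (i + p)) / p + 1

lemma vC_le (l : List Char) (i p : Nat) (hp : 1 ≤ p) (hip : i + p + 2 ≤ l.length) :
    vC l i p ≤ (l.length - i) / p := by
  have h1 : lcpB (l.drop i) (l.drop (i + p)) ≤ l.length - (i + p) := by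
    have := lcpB_le_right (l.drop i) (l.drop (i + p)); simpa using this
  have h2 : (l.length - (i + p)) / p + 1 = (l.length - i) / p := by
    have hs : l.length - (i + p) + p = l.length - i := by omega
    have := Nat.add_div_right (l.length - (i + p)) (show 0 < p by omega)
    rw [hs] at this; omega
  have h3 : lcpB (l.drop i) (l.drop (i + p)) / p ≤ (l.length - (i + p)) / p :=
    Nat.div_le_div_right h1
  simp only [vC]; omega

lemma countA_vC (l : List Char) (i j : Nat) (hij : i + 1 ≤ j) (hj : j + 2 ≤ l.length) :
    countA ((l.drop i).take (j - i)) (l.drop i) = vC l i (j - i) := by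
  have hdl : (l.drop i).length = l.length - i := by simp
  rw [countA_eq (l.drop i).length (l.drop i) (j - i) le_rfl (by omega) (by omega)]
  have hdd : List.drop (j - i) (List.drop i l) = List.drop (i + (j - i)) l := by
    rw [List.drop_drop]
  rw [hdd]
  rfl

-- A's inner j-loop, pruning included, is a running max of the candidate values
lemma innerA_eq (l : List Char) (i : Nat) :
    ∀ (js : List Nat) (sc : Nat), (∀ j ∈ js, i + 1 ≤ j ∧ j + 2 ≤ l.length) →
    js.foldl (fun sc j =>
        if (l.length - i - 1) / (j - i) < sc then sc
        else
          if countA ((l.drop i).take (j - i)) (l.drop i) > sc then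
            countA ((l.drop i).take (j - i)) (l.drop i)
          else sc) sc
      = js.foldl (fun sc j => max sc (vC l i (j - i))) sc := by
  intro js
  induction js with
  | nil => intro sc _; rfl
  | cons j js ih =>
    intro sc hmem
    obtain ⟨hij, hj⟩ := hmem j (by simp)
    simp only [List.foldl_cons]
    rw [ih _ (fun x hx => hmem x (by simp [hx]))]
    congr 1
    rw [countA_vC l i j hij hj]
    by_cases hpr : (l.length - i - 1) / (j - i) < sc
    · rw [if_pos hpr]
      have h1 : vC l i (j - i) ≤ (l.length - i) / (j - i) :=
        vC_le l i (j - i) (by omega) (by omega)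
      have h2 : (l.length - i) / (j - i) ≤ (l.length - i - 1) / (j - i) + 1 := by
        have hs : l.length - i - 1 + 1 = l.length - i := by omega
        have hmono : (l.length - i - 1 + 1) / (j - i) ≤ (l.length - i - 1 + (j - i)) / (j - i) :=
          Nat.div_le_div_right (by omega)
        have hadd := Nat.add_div_right (l.length - i - 1) (show 0 < j - i by omega)
        rw [hs] at hmono; omega
      omega
    · rw [if_neg hpr]
      split <;> omega

-- B's backward scan: incoming run is the LCP at the previous (higher) index
lemma goB_spec (l : List Char) (p : Nat) (hp : 1 ≤ p) (hpn : p + 2 ≤ l.length) :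
    ∀ (k : Nat) (best : Nat), k ≤ l.length - p →
    goB l l.length p k (lcpB (l.drop k) (l.drop (k + p))) best
      = max best (supL ((List.range (min k (l.length - 1 - p))).map (fun i => vC l i p))) := by
  intro k
  induction k with
  | zero =>
    intro best _
    simp [goB, supL]
  | succ k ih =>
    intro best hk
    have hkn : k < l.length := by omega
    have hkpn : k + p < l.length := by omega
    have hrun : lcpB (l.drop k) (l.drop (k + p))
        = if l[k]? = l[k + p]? then lcpB (l.drop (k + 1)) (l.drop (k + 1 + p)) + 1 else 0 := by
      rw [List.drop_eq_getElem_cons hkn, List.drop_eq_getElem_cons hkpn]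
      simp only [lcpB]
      rw [List.getElem?_eq_getElem hkn, List.getElem?_eq_getElem hkpn]
      have : k + p + 1 = k + 1 + p := by omega
      rw [this]
      by_cases hxy : l[k] = l[k + p] <;> simp [hxy]
    rw [goB]
    rw [← hrun]
    by_cases hc : k + p ≤ l.length - 2
    · rw [if_pos hc]
      rw [ih (max best (lcpB (l.drop k) (l.drop (k + p)) / p + 1)) (by omega)]
      have hmin1 : min (k + 1) (l.length - 1 - p) = k + 1 := by omega
      have hmin2 : min k (l.length - 1 - p) = k := by omega
      rw [hmin1, hmin2, supL_range_succ]
      simp only [vC]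
      omega
    · rw [if_neg hc]
      rw [ih best (by omega)]
      have hmin : min (k + 1) (l.length - 1 - p) = min k (l.length - 1 - p) := by omega
      rw [hmin]

-- B's period loop (break included) is a running max of the per-period suprema
lemma periodLoop_eq (l : List Char) :
    ∀ (ps : List Nat) (best : Nat), (∀ p ∈ ps, 1 ≤ p ∧ p + 2 ≤ l.length) →
    ps.Pairwise (· < ·) →
    periodLoop l l.length ps best
      = ps.foldl (fun b p =>
          max b (supL ((List.range (l.length - 1 - p)).map (fun i => vC l i p)))) best := by
  intro ps
  induction ps with
  | nil => intro best _ _; rfl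
  | cons p ps ih =>
    intro best hmem hpair
    obtain ⟨hp1, hp2⟩ := hmem p (by simp)
    have hsup_le : ∀ q, 1 ≤ q → p ≤ q →
        supL ((List.range (l.length - 1 - q)).map (fun i => vC l i q)) ≤ l.length / p := by
      intro q hq1 hpq
      apply supL_le
      intro x hx
      obtain ⟨i, hi, rfl⟩ := List.mem_map.mp hx
      have hilt := List.mem_range.mp hi
      have h1 : vC l i q ≤ (l.length - i) / q := vC_le l i q hq1 (by omega)
      have h2 : (l.length - i) / q ≤ l.length / q := Nat.div_le_div_right (by omega)
      have h3 : l.length / q ≤ l.length / p := Nat.div_le_div_left hpq (by omega)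
      omega
    rw [periodLoop]
    by_cases hbr : l.length / p < best
    · rw [if_pos hbr]
      have hall : ∀ q ∈ p :: ps,
          supL ((List.range (l.length - 1 - q)).map (fun i => vC l i q)) ≤ best := by
        intro q hq
        rcases List.mem_cons.mp hq with rfl | hq'
        · have := hsup_le q (by omega) le_rfl; omega
        · have hple : p < q := (List.pairwise_cons.mp hpair).1 q hq'
          have hq1 := (hmem q hq).1
          have := hsup_le q hq1 (by omega)
          omega
      have hfold := foldl_max_eq
        (fun p => supL ((List.range (l.length - 1 - p)).map (fun i => vC l i p))) (p :: ps) best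
      have hsb : supL ((p :: ps).map
          (fun p => supL ((List.range (l.length - 1 - p)).map (fun i => vC l i p)))) ≤ best := by
        apply supL_le
        intro x hx
        obtain ⟨q, hq, rfl⟩ := List.mem_map.mp hx
        exact hall q hq
      omega
    · rw [if_neg hbr]
      have hstart : lcpB (l.drop (l.length - p)) (l.drop (l.length - p + p)) = 0 := by
        have : l.length - p + p = l.length := by omega
        rw [this, List.drop_length]
        cases l.drop (l.length - p) <;> rfl
      have hgo := goB_spec l p hp1 hp2 (l.length - p) best le_rfl
      rw [hstart] at hgo
      have hmin : min (l.length - p) (l.length - 1 - p) = l.length - 1 - p := by omega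
      rw [hmin] at hgo
      rw [hgo, ih _ (fun q hq => hmem q (by simp [hq])) (List.Pairwise.of_cons hpair)]
      simp only [List.foldl_cons]

-- per-line suprema of the two traversal orders agree (same candidate set)
lemma sup_swap (l : List Char) :
    supL ((List.range (l.length - 1)).map (fun i =>
        supL ((List.range' (i + 1) ((l.length - 1) - (i + 1))).map (fun j => vC l i (j - i)))))
      = supL ((List.range' 1 ((l.length - 1) - 1)).map (fun p =>
          supL ((List.range (l.length - 1 - p)).map (fun i => vC l i p)))) := by
  apply Nat.le_antisymm
  · apply supL_le
    intro x hx
    obtain ⟨i, hi, rfl⟩ := List.mem_map.mp hx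
    have hilt := List.mem_range.mp hi
    apply supL_le
    intro y hy
    obtain ⟨j, hj, rfl⟩ := List.mem_map.mp hy
    obtain ⟨hj1, hj2⟩ := List.mem_range'_1.mp hj
    calc vC l i (j - i)
        ≤ supL ((List.range (l.length - 1 - (j - i))).map (fun i' => vC l i' (j - i))) := by
          apply le_supL
          exact List.mem_map.mpr ⟨i, List.mem_range.mpr (by omega), rfl⟩
      _ ≤ _ := by
          apply le_supL
          exact List.mem_map.mpr ⟨j - i, List.mem_range'_1.mpr ⟨by omega, by omega⟩, rfl⟩
  · apply supL_le
    intro x hx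
    obtain ⟨p, hp, rfl⟩ := List.mem_map.mp hx
    obtain ⟨hp1, hp2⟩ := List.mem_range'_1.mp hp
    apply supL_le
    intro y hy
    obtain ⟨i, hi, rfl⟩ := List.mem_map.mp hy
    have hilt := List.mem_range.mp hi
    have hvp : vC l i p = vC l i ((i + p) - i) := by congr 1; omega
    have hm1 : i + p ∈ List.range' (i + 1) ((l.length - 1) - (i + 1)) := by
      apply List.mem_range'_1.mpr
      constructor
      · omega
      · omega
    have hm2 : i ∈ List.range (l.length - 1) := List.mem_range.mpr (by omega)
    calc vC l i p
        ≤ supL ((List.range' (i + 1) ((l.length - 1) - (i + 1))).map (fun j => vC l i (j - i))) := by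
          rw [hvp]; exact le_supL (List.mem_map.mpr ⟨i + p, hm1, rfl⟩)
      _ ≤ _ := le_supL (List.mem_map.mpr ⟨i, hm2, rfl⟩)

-- the two per-line computations agree
lemma line_eq (l : List Char) :
    (List.range (l.length - 1)).foldl (fun sc i =>
        (List.range' (i + 1) ((l.length - 1) - (i + 1))).foldl (fun sc j =>
          if (l.length - i - 1) / (j - i) < sc then sc
          else
            if countA ((l.drop i).take (j - i)) (l.drop i) > sc then
              countA ((l.drop i).take (j - i)) (l.drop i)
            else sc) sc) 0
      = periodLoop l l.length (List.range' 1 ((l.length - 1) - 1)) 0 := by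
  have hA : (List.range (l.length - 1)).foldl (fun sc i =>
      (List.range' (i + 1) ((l.length - 1) - (i + 1))).foldl (fun sc j =>
        if (l.length - i - 1) / (j - i) < sc then sc
        else
          if countA ((l.drop i).take (j - i)) (l.drop i) > sc then
            countA ((l.drop i).take (j - i)) (l.drop i)
          else sc) sc) 0
      = (List.range (l.length - 1)).foldl (fun sc i =>
          max sc (supL ((List.range' (i + 1) ((l.length - 1) - (i + 1))).map
            (fun j => vC l i (j - i))))) 0 := by
    apply List.foldl_ext
    intro sc i _
    rw [innerA_eq l i _ sc ?_, foldl_max_eq]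
    intro j hj
    obtain ⟨h1, h2⟩ := List.mem_range'_1.mp hj
    exact ⟨by omega, by omega⟩
  have hB : periodLoop l l.length (List.range' 1 ((l.length - 1) - 1)) 0
      = (List.range' 1 ((l.length - 1) - 1)).foldl (fun b p =>
          max b (supL ((List.range (l.length - 1 - p)).map (fun i => vC l i p)))) 0 := by
    apply periodLoop_eq l _ 0 ?_ ?_
    · intro p hp
      obtain ⟨h1, h2⟩ := List.mem_range'_1.mp hp
      exact ⟨by omega, by omega⟩
    · exact List.pairwise_lt_range'
  rw [hA, hB, foldl_max_eq, foldl_max_eq]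
  have := sup_swap l
  omega

-- ===== VERDICT (by name: the statement is the Claim_ definition above) =====
theorem solve_spec : Claim_equal_solve := by
  intro input_file _
  unfold Spec_solve solve solve_alt
  apply List.foldl_ext
  intro acc line _
  simp only []
  rw [line_eq line.toList]
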